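-- pv_equiv track=rewrite | github.com/bvorapoom/usc_apds | 544_NLP/Homework/Homework2/code_results/task4.py | get_transition_default
-- ===== SOURCE A (Python) =====
-- def get_transition_default(transition):
--     transition_def = {}
--
--     for k, v in transition.items():
--         if k[0] != 'start':
--             if k[0] not in transition_def.keys():
--                 transition_def[k[0]] = (k[1], v)
--             else:
--                 if v > transition_def[k[0]][1]:
--                     transition_def[k[0]] = (k[1], v)
--
--     return transition_def
-- ===== SOURCE B (Python) =====
-- def get_transition_default(transition):
--     # pass 1: group (dest, weight) pairs by source state (skipping 'start')
--     groups = {}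
--     for k, v in transition.items():
--         if k[0] != 'start':
--             groups.setdefault(k[0], []).append((k[1], v))
--     # pass 2: pick the heaviest transition per source (max keeps the first on ties)
--     return {src: max(pairs, key=lambda p: p[1]) for src, pairs in groups.items()}
-- ===== Notes on version B (the rewrite author's own statement) =====
-- stated objective: alternative
-- what changed: A fuses grouping and maximisation into one dict-update scan with a conditional overwrite; B first builds a dict grouping all (dest, weight) pairs per source, then maps Python's built-in max (first maximum on ties, matching A's strict '>') over the groups in a second pass. Pre_ excludes association lists with duplicate (src, dst) keys, which do not denote any Python dict (A's parameter is a dict, whose keys are unique).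
import Mathlib
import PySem

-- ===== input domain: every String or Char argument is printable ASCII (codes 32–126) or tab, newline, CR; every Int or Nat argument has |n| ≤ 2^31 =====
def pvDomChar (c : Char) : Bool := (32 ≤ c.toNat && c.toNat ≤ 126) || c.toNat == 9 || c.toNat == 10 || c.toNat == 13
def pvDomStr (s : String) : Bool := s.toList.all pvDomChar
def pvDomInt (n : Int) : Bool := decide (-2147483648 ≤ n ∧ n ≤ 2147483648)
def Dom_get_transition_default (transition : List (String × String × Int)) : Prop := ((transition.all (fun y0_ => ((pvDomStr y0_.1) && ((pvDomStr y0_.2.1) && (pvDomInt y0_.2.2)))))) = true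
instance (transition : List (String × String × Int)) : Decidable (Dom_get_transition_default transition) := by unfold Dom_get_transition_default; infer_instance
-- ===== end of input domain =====

-- B replaces A's fused scan-and-reduce by two passes: group the (dest, weight) pairs by
-- source state, then take each group's max (first maximum on ties) — objective: alternative.

-- ===== PORT A =====
-- literal port of A: one fold keeping, per source state, the best (dest, weight) so far
def get_transition_default (transition : List (String × String × Int)) : List (String × String × Int) :=
  let transition_def : PySem.Dict String (String × Int) :=
    transition.foldl (fun d t =>
      if t.1 ≠ "start" then
        match d.get? t.1 with
        | none => d.insert t.1 (t.2.1, t.2.2)          -- k[0] not in keys()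
        | some p => if t.2.2 > p.2 then d.insert t.1 (t.2.1, t.2.2) else d
      else d) PySem.Dict.empty
  transition_def.items

-- ===== PORT B =====
-- literal port of B: pass 1 groups pairs by source, pass 2 maps max over the groups
def get_transition_default_alt (transition : List (String × String × Int)) : List (String × String × Int) :=
  let groups : PySem.Dict String (List (String × Int)) :=
    transition.foldl (fun g t =>
      if t.1 ≠ "start" then g.modify t.1 [] (· ++ [(t.2.1, t.2.2)]) else g) PySem.Dict.empty
  groups.items.map (fun sp =>
    match PySem.List.max? sp.2 (fun p => p.2) with
    | some m => (sp.1, m.1, m.2)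
    | none => (sp.1, "", 0))     -- unreachable: every group is built nonempty

-- ===== PRECONDITION & SPEC =====
-- Pre_ excludes association lists whose (src, dst) keys repeat: no Python dict has duplicate
-- keys, so such lists do not denote any input of A (A's parameter is a dict).
def Pre_get_transition_default (transition : List (String × String × Int)) : Prop :=
  (transition.map (fun t => (t.1, t.2.1))).Nodup
instance (transition : List (String × String × Int)) : Decidable (Pre_get_transition_default transition) := by unfold Pre_get_transition_default; infer_instance

def pvWitness_get_transition_default : (List (String × String × Int)) :=
  [("a", "x", 2), ("a", "y", 3), ("start", "a", 1), ("b", "x", -1)]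

def Spec_get_transition_default (transition : List (String × String × Int)) (out : List (String × String × Int)) : Prop := out = get_transition_default_alt transition
instance (transition : List (String × String × Int)) (out : List (String × String × Int)) : Decidable (Spec_get_transition_default transition out) := by unfold Spec_get_transition_default; infer_instance

-- ===== CLAIM (what is proved, stated in full; the proofs are below) =====
def Claim_equal_get_transition_default : Prop := ∀ (transition : List (String × String × Int)), Dom_get_transition_default transition → Pre_get_transition_default transition → Spec_get_transition_default transition (get_transition_default transition)

-- ===== LEMMAS AND PROOFS =====

-- the (dest, weight) pairs that l contributes to source state c
def pairsAt (c : String) (l : List (String × String × Int)) : List (String × Int) :=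
  (l.filter (fun t => decide (t.1 ≠ "start") && (t.1 == c))).map (fun t => (t.2.1, t.2.2))

-- the sources l touches (in order, with repeats)
def srcsOf (l : List (String × String × Int)) : List String :=
  (l.filter (fun t => decide (t.1 ≠ "start"))).map (·.1)

theorem pairsAt_cons (c : String) (t : String × String × Int) (l : List (String × String × Int)) :
    pairsAt c (t :: l) =
      (if t.1 ≠ "start" ∧ t.1 = c then [(t.2.1, t.2.2)] else []) ++ pairsAt c l := by
  simp only [pairsAt, List.filter_cons]
  by_cases h : t.1 ≠ "start" ∧ t.1 = c
  · obtain ⟨h1, h2⟩ := h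
    subst h2
    simp [h1]
  · have hb : (decide (t.1 ≠ "start") && (t.1 == c)) = false := by
      rcases not_and_or.mp h with h1 | h2
      · simp [not_not.mp h1]
      · simp [h2]
    simp [hb, h]

-- A's fold: the entry at c is max? of pairsAt c (first maximum wins, exactly A's strict '>')
theorem foldA_get? (l : List (String × String × Int)) (d : PySem.Dict String (String × Int))
    (c : String) :
    (l.foldl (fun d t =>
      if t.1 ≠ "start" then
        match d.get? t.1 with
        | none => d.insert t.1 (t.2.1, t.2.2)
        | some p => if t.2.2 > p.2 then d.insert t.1 (t.2.1, t.2.2) else d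
      else d) d).get? c
    = (pairsAt c l).foldl (fun acc x =>
        match acc with
        | none => some x
        | some m => if m.2 < x.2 then some x else some m) (d.get? c) := by
  induction l generalizing d with
  | nil => simp [pairsAt]
  | cons t l ih =>
    rw [List.foldl_cons, ih, pairsAt_cons, List.foldl_append]
    congr 1
    by_cases hs : t.1 = "start"
    · simp [hs]
    · simp only [ne_eq, hs, not_false_eq_true, if_true]
      by_cases hc : t.1 = c
      · subst hc
        rw [if_pos (show True ∧ t.1 = t.1 from ⟨trivial, rfl⟩)]
        cases hget : d.get? t.1 with
        | none =>
          dsimp only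
          rw [List.foldl_cons, List.foldl_nil, PySem.Dict.get?_insert]
          simp
        | some p =>
          dsimp only
          by_cases hlt : p.2 < t.2.2
          · rw [if_pos (show t.2.2 > p.2 from hlt), List.foldl_cons, List.foldl_nil,
                PySem.Dict.get?_insert]
            simp [hlt]
          · rw [if_neg (show ¬ t.2.2 > p.2 from hlt), hget, List.foldl_cons, List.foldl_nil]
            simp [hlt]
      · have hne : ¬ (True ∧ t.1 = c) := fun h => hc h.2
        rw [if_neg hne, List.foldl_nil]
        cases hget : d.get? t.1 with
        | none =>
          dsimp only
          rw [PySem.Dict.get?_insert, if_neg (show ¬ c = t.1 from fun h => hc h.symm)]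
        | some p =>
          dsimp only
          by_cases hlt : t.2.2 > p.2
          · rw [if_pos hlt, PySem.Dict.get?_insert,
                if_neg (show ¬ c = t.1 from fun h => hc h.symm)]
          · rw [if_neg hlt]

-- A's fold: the keys are d's keys updated by the touched sources, in order
theorem foldA_keys (l : List (String × String × Int)) (d : PySem.Dict String (String × Int)) :
    (l.foldl (fun d t =>
      if t.1 ≠ "start" then
        match d.get? t.1 with
        | none => d.insert t.1 (t.2.1, t.2.2)
        | some p => if t.2.2 > p.2 then d.insert t.1 (t.2.1, t.2.2) else d
      else d) d).keys = PySem.Set.update d.keys (srcsOf l) := by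
  induction l generalizing d with
  | nil => simp [srcsOf, PySem.Set.update_nil]
  | cons t l ih =>
    rw [List.foldl_cons]
    by_cases hs : t.1 = "start"
    · simp only [hs, ne_eq, not_true_eq_false, if_false, ih, srcsOf, List.filter_cons]
      simp [hs]
    · have hsrc : srcsOf (t :: l) = t.1 :: srcsOf l := by
        simp [srcsOf, hs]
      rw [hsrc, PySem.Set.update_cons]
      have hadd : PySem.Set.add d.keys t.1 = (match d.get? t.1 with
        | none => d.insert t.1 (t.2.1, t.2.2)
        | some p => if t.2.2 > p.2 then d.insert t.1 (t.2.1, t.2.2) else d).keys := by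
        cases hget : d.get? t.1 with
        | none =>
          have hcf : d.contains t.1 = false := (PySem.Dict.get?_eq_none_iff_contains d t.1).mp hget
          have hkc : (PySem.Dict.keys d).contains t.1 = false := by
            rw [PySem.Dict.contains_eq_decide_mem_keys] at hcf
            simpa using hcf
          have hmem : t.1 ∉ d.keys := by simpa using hkc
          simp [PySem.Set.add, hkc, hmem, PySem.Dict.keys_insert_of_not_contains d _ hcf]
        | some p =>
          have hct : d.contains t.1 = true := by
            have := (PySem.Dict.get?_eq_none_iff_contains d t.1)
            cases hc : d.contains t.1
            · rw [this.mpr hc] at hget; exact absurd hget (by simp)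
            · rfl
          have hkc : (PySem.Dict.keys d).contains t.1 = true := by
            rw [PySem.Dict.contains_eq_decide_mem_keys] at hct
            simpa using hct
          have hmem : t.1 ∈ d.keys := by simpa using hkc
          by_cases hlt : t.2.2 > p.2
          · simp [PySem.Set.add, hkc, hmem, hlt, PySem.Dict.keys_insert_of_contains d _ hct]
          · simp [PySem.Set.add, hkc, hmem, hlt]
      simp only [hs, ne_eq, not_false_iff, if_true]
      rw [ih, hadd]

-- B's grouping fold: the group at c is exactly pairsAt c
theorem foldB_getD (l : List (String × String × Int))
    (g : PySem.Dict String (List (String × Int))) (c : String) :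
    (l.foldl (fun g t =>
      if t.1 ≠ "start" then g.modify t.1 [] (· ++ [(t.2.1, t.2.2)]) else g) g).getD c []
    = g.getD c [] ++ pairsAt c l := by
  induction l generalizing g with
  | nil => simp [pairsAt]
  | cons t l ih =>
    rw [List.foldl_cons, pairsAt_cons]
    by_cases hs : t.1 = "start"
    · rw [if_neg (not_not_intro hs), ih,
          if_neg (show ¬ (t.1 ≠ "start" ∧ t.1 = c) from fun h => h.1 hs), List.nil_append]
    · rw [if_pos hs, ih, PySem.Dict.getD_modify]
      by_cases hc : c = t.1
      · subst hc
        rw [if_pos rfl, if_pos (show t.1 ≠ "start" ∧ t.1 = t.1 from ⟨hs, rfl⟩)]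
        simp [List.append_assoc]
      · rw [if_neg hc,
           if_neg (show ¬ (t.1 ≠ "start" ∧ t.1 = c) from fun h => hc h.2.symm), List.nil_append]

-- B's grouping fold: same key set and order as A's fold
theorem foldB_keys (l : List (String × String × Int))
    (g : PySem.Dict String (List (String × Int))) :
    (l.foldl (fun g t =>
      if t.1 ≠ "start" then g.modify t.1 [] (· ++ [(t.2.1, t.2.2)]) else g) g).keys
    = PySem.Set.update g.keys (srcsOf l) := by
  induction l generalizing g with
  | nil => simp [srcsOf, PySem.Set.update_nil]
  | cons t l ih =>
    rw [List.foldl_cons]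
    by_cases hs : t.1 = "start"
    · simp only [hs, ne_eq, not_true_eq_false, if_false, ih, srcsOf, List.filter_cons]
      simp [hs]
    · have hsrc : srcsOf (t :: l) = t.1 :: srcsOf l := by
        simp [srcsOf, hs]
      rw [hsrc, PySem.Set.update_cons]
      simp only [hs, ne_eq, not_false_iff, if_true, ih]
      congr 1
      rw [PySem.Dict.keys_modify]
      by_cases hct : g.contains t.1
      · have hkc : (PySem.Dict.keys g).contains t.1 = true := by
          rw [PySem.Dict.contains_eq_decide_mem_keys] at hct
          simpa using hct
        have hmem : t.1 ∈ g.keys := by simpa using hkc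
        simp [PySem.Set.add, hmem, PySem.Dict.keys_insert_of_contains g _ hct]
      · have hcf : g.contains t.1 = false := by simpa using hct
        have hkc : (PySem.Dict.keys g).contains t.1 = false := by
          rw [PySem.Dict.contains_eq_decide_mem_keys] at hcf
          simpa using hcf
        have hmem : t.1 ∉ g.keys := by simpa using hkc
        simp [PySem.Set.add, hmem, PySem.Dict.keys_insert_of_not_contains g _ hcf]

-- if c was touched, its group is nonempty
theorem pairsAt_ne_nil_of_mem (l : List (String × String × Int)) (c : String)
    (h : c ∈ srcsOf l) : pairsAt c l ≠ [] := by
  rcases List.mem_map.mp h with ⟨t, ht, hc⟩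
  have hf := List.of_mem_filter ht
  have hmem : (t.2.1, t.2.2) ∈ pairsAt c l := by
    apply List.mem_map.mpr
    refine ⟨t, List.mem_filter.mpr ⟨List.mem_of_mem_filter ht, ?_⟩, rfl⟩
    simp only [Bool.and_eq_true, beq_iff_eq, hc]
    exact ⟨hc ▸ hf, trivial⟩
  exact List.ne_nil_of_mem hmem

-- ===== VERDICT (by name: the statement is the Claim_ definition above) =====
theorem get_transition_default_spec : Claim_equal_get_transition_default := by
  intro transition _ _
  show get_transition_default transition = get_transition_default_alt transition
  unfold get_transition_default get_transition_default_alt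
  simp only []
  -- names for the two folded dicts
  set dA := transition.foldl (fun d t =>
      if t.1 ≠ "start" then
        match d.get? t.1 with
        | none => d.insert t.1 (t.2.1, t.2.2)
        | some p => if t.2.2 > p.2 then d.insert t.1 (t.2.1, t.2.2) else d
      else d) (PySem.Dict.empty : PySem.Dict String (String × Int)) with hdA
  set dB := transition.foldl (fun g t =>
      if t.1 ≠ "start" then g.modify t.1 [] (· ++ [(t.2.1, t.2.2)]) else g)
      (PySem.Dict.empty : PySem.Dict String (List (String × Int))) with hdB
  have hKA : dA.keys = PySem.Set.ofList (srcsOf transition) := by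
    rw [hdA, foldA_keys]
    simp [PySem.Set.update_nil_left, PySem.Dict.keys_empty]
  have hKB : dB.keys = PySem.Set.ofList (srcsOf transition) := by
    rw [hdB, foldB_keys]
    simp [PySem.Set.update_nil_left, PySem.Dict.keys_empty]
  have hNA : dA.keys.Nodup := by rw [hKA]; exact PySem.Set.nodup_ofList _
  have hNB : dB.keys.Nodup := by rw [hKB]; exact PySem.Set.nodup_ofList _
  rw [PySem.Dict.items_eq_map_keys dA hNA ("", 0),
      PySem.Dict.items_eq_map_keys dB hNB [], List.map_map, hKA, hKB]
  apply List.map_congr_left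
  intro k hk
  have hmem : k ∈ srcsOf transition := (PySem.Set.mem_ofList _ _).mp hk
  have hgB : dB.getD k [] = pairsAt k transition := by
    rw [hdB, foldB_getD]; simp [PySem.Dict.getD_empty]
  have hgA : dA.get? k = PySem.List.max? (pairsAt k transition) (fun p => p.2) := by
    rw [hdA, foldA_get?, PySem.Dict.get?_empty]
    unfold PySem.List.max?
    congr 1
    funext acc x
    cases acc <;> rfl
  have hne := pairsAt_ne_nil_of_mem transition k hmem
  cases hmax : PySem.List.max? (pairsAt k transition) (fun p => p.2) with
  | none => exact absurd ((PySem.List.max?_eq_none_iff _ _).mp hmax) hne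
  | some m =>
    simp only [Function.comp, hgB, hmax, PySem.Dict.getD_eq_get?_getD, hgA]
    rfl
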